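-- pv_equiv track=rewrite | github.com/betcherj/AOC | pythonProject/day_twenty_three/part_one.py | find_three_deep_sets
-- ===== SOURCE A (Python) =====
-- def find_three_deep_sets(path, graph, depth, checked_nodes):
--     # They all need to be connected ..
--     if depth == 3:
--         return [path]
--     if path[-1] in checked_nodes:
--         return []
--
--     res = []
--     for item in graph[path[-1]]:
--         if item not in path and item not in checked_nodes:
--             res += find_three_deep_sets(path.copy() + [item], graph, depth + 1, checked_nodes)
--
--     return res
-- ===== SOURCE B (Python) =====
-- def find_three_deep_sets(path, graph, depth, checked_nodes):
--     # Level-by-level (BFS) expansion of a path frontier instead of recursion;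
--     # yields the same list in the same order since all results lie at the same depth.
--     frontier = [path]
--     while frontier and depth != 3:
--         frontier = [p + [item]
--                     for p in frontier
--                     if p[-1] not in checked_nodes
--                     for item in graph[p[-1]]
--                     if item not in p and item not in checked_nodes]
--         depth += 1
--     return frontier
-- ===== Notes on version B (the rewrite author's own statement) =====
-- stated objective: alternative
-- what changed: A's depth-bounded recursive DFS is replaced by a breadth-first level-by-level expansion of a frontier of paths (a comprehension per level); since every emitted path lies at the same final depth, the level order equals A's DFS pre-order exactly.
import Mathlib
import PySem

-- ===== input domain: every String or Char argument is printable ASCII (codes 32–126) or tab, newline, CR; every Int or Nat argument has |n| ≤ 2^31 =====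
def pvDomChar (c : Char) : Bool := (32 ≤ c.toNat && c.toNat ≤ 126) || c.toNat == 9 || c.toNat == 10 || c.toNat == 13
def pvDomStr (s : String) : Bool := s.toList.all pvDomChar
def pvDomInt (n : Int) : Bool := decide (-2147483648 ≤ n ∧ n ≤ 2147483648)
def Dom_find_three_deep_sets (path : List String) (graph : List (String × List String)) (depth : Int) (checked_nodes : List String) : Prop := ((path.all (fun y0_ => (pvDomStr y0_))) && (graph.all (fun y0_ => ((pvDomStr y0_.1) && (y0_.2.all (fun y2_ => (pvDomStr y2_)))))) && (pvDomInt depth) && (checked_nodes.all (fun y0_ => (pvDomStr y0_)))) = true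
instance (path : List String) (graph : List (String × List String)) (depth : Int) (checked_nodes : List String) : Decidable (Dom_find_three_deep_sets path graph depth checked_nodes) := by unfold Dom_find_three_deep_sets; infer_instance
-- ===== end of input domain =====

-- B replaces A's recursive DFS by a breadth-first level-by-level expansion of a frontier of
-- paths (objective: alternative decomposition; same output list in the same order, since every
-- emitted path lies at the same final depth).

-- Termination helpers (cited by name in the ports' decreasing_by blocks).
def pvVals (graph : List (String × List String)) : List String := (graph.map Prod.snd).flatten

def pvM (graph : List (String × List String)) (path : List String) : Nat :=
  ((PySem.List.dedup (pvVals graph)).filter (fun x => !path.contains x)).length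

theorem pvM_lt (graph : List (String × List String)) (path : List String) (item : String)
    (hv : item ∈ pvVals graph) (hp : path.contains item = false) :
    pvM graph (path ++ [item]) < pvM graph path := by
  unfold pvM
  have hd : item ∈ PySem.List.dedup (pvVals graph) := by
    simpa [PySem.List.mem_dedup] using hv
  have hpred : ∀ x : String,
      (!(path ++ [item]).contains x) = ((!path.contains x) && !(x == item)) := by
    intro x
    cases hpx : path.contains x <;> cases hxi : x == item <;>
      simp_all [beq_iff_eq, ← List.elem_eq_contains, List.elem_iff]
  have hsplit : (PySem.List.dedup (pvVals graph)).filter (fun x => !(path ++ [item]).contains x)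
      = ((PySem.List.dedup (pvVals graph)).filter (fun x => !path.contains x)).filter
          (fun x => !(x == item)) := by
    rw [List.filter_filter]
    apply List.filter_congr
    intro x _
    rw [hpred x]
    cases hpx : path.contains x <;> cases hxi : x == item <;> simp [hpx, hxi]
  rw [hsplit]
  apply List.length_filter_lt_length_iff_exists.mpr
  refine ⟨item, ?_, by simp⟩
  have hp' : item ∉ path := by simpa using hp
  simp [List.mem_filter, PySem.List.mem_dedup, hv, hp']

theorem pvMem_vals_of_get? (graph : List (String × List String)) (last : String)
    (ns : List String) (h : PySem.Dict.get? (PySem.Dict.mk graph) last = some ns) :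
    ∀ item ∈ ns, item ∈ pvVals graph := by
  induction graph with
  | nil => simp [PySem.Dict.get?] at h
  | cons pr rest ih =>
    obtain ⟨k, v⟩ := pr
    rw [PySem.Dict.get?_mk_cons] at h
    by_cases hk : (k == last) = true
    · rw [if_pos hk] at h
      obtain rfl : v = ns := by simpa using h
      intro x hx
      simp [pvVals, hx]
    · rw [if_neg hk] at h
      intro x hx
      have := ih h x hx
      simp only [pvVals, List.map_cons, List.flatten_cons, List.mem_append]
      exact Or.inr (by simpa [pvVals] using this)

-- ===== PORT A =====
def find_three_deep_sets (path : List String) (graph : List (String × List String)) (depth : Int) (checked_nodes : List String) : List (List String) :=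
  if depth == 3 then [path]
  else
    match PySem.List.pyGet? path (-1) with
    | none => []  -- Python raises IndexError here (empty path); excluded by Pre_
    | some last =>
      if checked_nodes.contains last then []
      else
        match hns : PySem.Dict.get? (PySem.Dict.mk graph) last with
        | none => []  -- Python raises KeyError here; excluded by Pre_
        | some ns =>
          ns.attach.foldl
            (fun res item =>
              if _h : ¬ path.contains item.1 = true ∧ ¬ checked_nodes.contains item.1 = true then
                res ++ find_three_deep_sets (path ++ [item.1]) graph (depth + 1) checked_nodes
              else res) []
termination_by pvM graph path
decreasing_by
  exact pvM_lt graph path item.1 (pvMem_vals_of_get? graph last ns hns item.1 item.2)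
    (by simpa using _h.1)

-- ===== PORT B =====
-- one level of Source B's comprehension: all one-step extensions of a single frontier path
def pvLevel (graph : List (String × List String)) (checked_nodes : List String)
    (p : List String) : List (List String) :=
  match p.getLast? with
  | none => []  -- p[-1] raises IndexError in Python; excluded by Pre_
  | some last =>
    if last ∈ checked_nodes then []
    else
      match graph.find? (fun pr => pr.1 == last) with
      | none => []  -- graph[p[-1]] raises KeyError in Python; excluded by Pre_
      | some pr =>
        (pr.2.filter (fun item => decide (item ∉ p ∧ item ∉ checked_nodes))).map
          (fun item => p ++ [item])

theorem pvLevel_lt (graph : List (String × List String)) (checked_nodes : List String)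
    (p q : List String) (hq : q ∈ pvLevel graph checked_nodes p) :
    pvM graph q < pvM graph p := by
  unfold pvLevel at hq
  rcases h1 : p.getLast? with _ | last
  · rw [h1] at hq; simp at hq
  · rw [h1] at hq
    dsimp only at hq
    by_cases hc : last ∈ checked_nodes
    · rw [if_pos hc] at hq; simp at hq
    · rw [if_neg hc] at hq
      rcases h2 : graph.find? (fun pr => pr.1 == last) with _ | pr
      · rw [h2] at hq; simp at hq
      · rw [h2] at hq
        obtain ⟨item, hitem, rfl⟩ := List.mem_map.mp hq
        have hmem : item ∈ pr.2 := List.mem_of_mem_filter hitem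
        have hpred := List.of_mem_filter hitem
        have hnp : item ∉ p := by
          by_contra hcon
          simp [hcon] at hpred
        have hprg : pr ∈ graph := List.mem_of_find?_eq_some h2
        have hv : item ∈ pvVals graph := by
          unfold pvVals
          exact List.mem_flatten.mpr ⟨pr.2, List.mem_map_of_mem hprg, hmem⟩
        exact pvM_lt graph p item hv (by simpa using hnp)

theorem pvLe_foldr_max (l : List Nat) (a : Nat) (h : a ∈ l) : a ≤ l.foldr max 0 := by
  induction l with
  | nil => cases h
  | cons x xs ih =>
    rcases List.mem_cons.mp h with rfl | h
    · exact le_max_left _ _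
    · exact le_trans (ih h) (le_max_right _ _)

theorem pvFoldr_max_lt (l : List Nat) (m : Nat) (hm : 0 < m) (h : ∀ a ∈ l, a < m) :
    l.foldr max 0 < m := by
  induction l with
  | nil => simpa using hm
  | cons x xs ih =>
    exact max_lt (h x (List.mem_cons_self)) (ih (fun a ha => h a (List.mem_cons_of_mem _ ha)))

def pvF (graph : List (String × List String)) (frontier : List (List String)) : Nat :=
  if frontier.isEmpty then 0 else (frontier.map (pvM graph)).foldr max 0 + 1

theorem pvF_lt (graph : List (String × List String)) (checked_nodes : List String)
    (frontier : List (List String)) (hne : frontier.isEmpty = false) :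
    pvF graph (frontier.flatMap (pvLevel graph checked_nodes)) < pvF graph frontier := by
  have hall : ∀ q ∈ frontier.flatMap (pvLevel graph checked_nodes),
      pvM graph q < (frontier.map (pvM graph)).foldr max 0 := by
    intro q hq
    obtain ⟨p, hp, hqp⟩ := List.mem_flatMap.mp hq
    have h1 := pvLevel_lt graph checked_nodes p q hqp
    have h2 : pvM graph p ≤ (frontier.map (pvM graph)).foldr max 0 :=
      pvLe_foldr_max _ _ (List.mem_map_of_mem hp)
    omega
  cases hflat : frontier.flatMap (pvLevel graph checked_nodes) with
  | nil => simp [pvF, hne]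
  | cons q qs =>
    have hq0 : pvM graph q < (frontier.map (pvM graph)).foldr max 0 := by
      exact hall q (by rw [hflat]; exact List.mem_cons_self)
    have hMpos : 0 < (frontier.map (pvM graph)).foldr max 0 := by omega
    have hlt := pvFoldr_max_lt ((q :: qs).map (pvM graph)) _ hMpos
      (by
        intro a ha
        obtain ⟨x, hx, rfl⟩ := List.mem_map.mp ha
        exact hall x (by rw [hflat]; exact hx))
    simp only [pvF, hne, hflat]
    simp only [List.isEmpty_cons, if_neg Bool.false_ne_true]
    omega

-- the 'while frontier and depth != 3:' loop of Source B
def pvBFS (graph : List (String × List String)) (checked_nodes : List String)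
    (depth : Int) (frontier : List (List String)) : List (List String) :=
  if frontier.isEmpty || depth == 3 then frontier
  else pvBFS graph checked_nodes (depth + 1) (frontier.flatMap (pvLevel graph checked_nodes))
termination_by pvF graph frontier
decreasing_by
  have hne : frontier.isEmpty = false := by
    rename_i hcond
    cases hI : frontier.isEmpty
    · rfl
    · exact absurd (by simp [hI]) hcond
  simpa using pvF_lt graph checked_nodes frontier hne

def find_three_deep_sets_alt (path : List String) (graph : List (String × List String)) (depth : Int) (checked_nodes : List String) : List (List String) :=
  pvBFS graph checked_nodes depth [path]

-- ===== PRECONDITION & SPEC =====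
def pvKeys (graph : List (String × List String)) : List String := graph.map Prod.fst

-- every neighbour value occurring in the graph is itself a key or a checked node
def pvClosed (graph : List (String × List String)) (checked_nodes : List String) : Prop :=
  ∀ pr ∈ graph, ∀ v ∈ pr.2, v ∈ pvKeys graph ∨ v ∈ checked_nodes

-- Pre_ excludes the inputs on which the recursion's graph[...] / path[-1] lookups can raise
-- (KeyError / IndexError): it requires a nonempty path whose last node is checked or a graph key,
-- and (unless depth is 2 or 3, where no deeper lookup happens) that every neighbour value in the
-- graph is a key or a checked node; this conservatively also excludes some inputs whose missing
-- keys happen never to be reached, on which A does return (see cites).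
def Pre_find_three_deep_sets (path : List String) (graph : List (String × List String)) (depth : Int) (checked_nodes : List String) : Prop :=
  depth = 3 ∨
    (path ≠ [] ∧
      (path.getLastD "" ∈ checked_nodes ∨
        (path.getLastD "" ∈ pvKeys graph ∧ (depth = 2 ∨ pvClosed graph checked_nodes))))

instance (path : List String) (graph : List (String × List String)) (depth : Int) (checked_nodes : List String) : Decidable (Pre_find_three_deep_sets path graph depth checked_nodes) := by unfold Pre_find_three_deep_sets pvClosed; infer_instance

def pvWitness_find_three_deep_sets : List String × (List (String × List String)) × Int × List String :=
  (["a"], [("a", ["b"]), ("b", [])], 0, [])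

def Spec_find_three_deep_sets (path : List String) (graph : List (String × List String)) (depth : Int) (checked_nodes : List String) (out : List (List String)) : Prop := out = find_three_deep_sets_alt path graph depth checked_nodes
instance (path : List String) (graph : List (String × List String)) (depth : Int) (checked_nodes : List String) (out : List (List String)) : Decidable (Spec_find_three_deep_sets path graph depth checked_nodes out) := by unfold Spec_find_three_deep_sets; infer_instance

-- ===== CLAIM (what is proved, stated in full; the proofs are below) =====
def Claim_equal_find_three_deep_sets : Prop := ∀ (path : List String) (graph : List (String × List String)) (depth : Int) (checked_nodes : List String), Dom_find_three_deep_sets path graph depth checked_nodes → Pre_find_three_deep_sets path graph depth checked_nodes → Spec_find_three_deep_sets path graph depth checked_nodes (find_three_deep_sets path graph depth checked_nodes)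

-- ===== LEMMAS AND PROOFS =====

theorem pvGet_last (p : List String) (hp : p ≠ []) :
    PySem.List.pyGet? p (-1) = some (p.getLastD "") := by
  rw [PySem.List.pyGet?_neg_one]
  cases h : p.getLast? with
  | none => exact absurd (List.getLast?_eq_none_iff.mp h) hp
  | some a => simp [List.getLastD_eq_getLast?, h]

theorem pvLast?_eq (p : List String) (hp : p ≠ []) : p.getLast? = some (p.getLastD "") := by
  cases h : p.getLast? with
  | none => exact absurd (List.getLast?_eq_none_iff.mp h) hp
  | some a => simp [List.getLastD_eq_getLast?, h]

theorem pvGet?_of_mem_keys (graph : List (String × List String)) (last : String)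
    (h : last ∈ pvKeys graph) : ∃ ns, PySem.Dict.get? (PySem.Dict.mk graph) last = some ns := by
  induction graph with
  | nil => simp [pvKeys] at h
  | cons pr rest ih =>
    obtain ⟨k, v⟩ := pr
    rw [PySem.Dict.get?_mk_cons]
    by_cases hk : (k == last) = true
    · exact ⟨v, by rw [if_pos hk]⟩
    · have hl : last ∈ pvKeys rest := by
        simp only [pvKeys, List.map_cons, List.mem_cons] at h
        rcases h with h | h
        · exact absurd (by simp [h]) hk
        · exact h
      obtain ⟨ns, hns⟩ := ih hl
      exact ⟨ns, by rw [if_neg hk]; exact hns⟩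

theorem pvFind_eq (graph : List (String × List String)) (last : String) :
    (graph.find? (fun pr => pr.1 == last)).map Prod.snd
      = PySem.Dict.get? (PySem.Dict.mk graph) last := by
  induction graph with
  | nil => simp [PySem.Dict.get?]
  | cons pr rest ih =>
    obtain ⟨k, v⟩ := pr
    rw [PySem.Dict.get?_mk_cons]
    by_cases hk : (k == last) = true
    · simp [List.find?, hk]
    · simp only [List.find?, hk, if_neg hk]
      simpa using ih

theorem pvMem_graph_of_get? (graph : List (String × List String)) (last : String)
    (ns : List String) (h : PySem.Dict.get? (PySem.Dict.mk graph) last = some ns) :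
    ∃ pr ∈ graph, pr.2 = ns := by
  induction graph with
  | nil => simp [PySem.Dict.get?] at h
  | cons pr rest ih =>
    obtain ⟨k, v⟩ := pr
    rw [PySem.Dict.get?_mk_cons] at h
    by_cases hk : (k == last) = true
    · rw [if_pos hk] at h
      exact ⟨(k, v), by simp, by simpa using h⟩
    · rw [if_neg hk] at h
      obtain ⟨q, hq, hq2⟩ := ih h
      exact ⟨q, by simp [hq], hq2⟩

theorem pvA_three (path : List String) (graph : List (String × List String)) (depth : Int)
    (checked_nodes : List String) (hd : depth = 3) :
    find_three_deep_sets path graph depth checked_nodes = [path] := by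
  rw [find_three_deep_sets]
  simp [hd]

theorem pvA_checked (path : List String) (graph : List (String × List String)) (depth : Int)
    (checked_nodes : List String) (last : String) (hd : depth ≠ 3)
    (hl : PySem.List.pyGet? path (-1) = some last) (hc : checked_nodes.contains last = true) :
    find_three_deep_sets path graph depth checked_nodes = [] := by
  have hb : (depth == 3) = false := by simpa using hd
  rw [find_three_deep_sets]
  simp [hb, hl]
  intro h
  exact absurd (by simpa using hc) h

theorem pvA_expand (path : List String) (graph : List (String × List String)) (depth : Int)
    (checked_nodes : List String) (last : String) (ns : List String) (hd : depth ≠ 3)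
    (hl : PySem.List.pyGet? path (-1) = some last) (hc : checked_nodes.contains last = false)
    (hns : PySem.Dict.get? (PySem.Dict.mk graph) last = some ns) :
    find_three_deep_sets path graph depth checked_nodes =
      (ns.filter (fun item => !path.contains item && !checked_nodes.contains item)).flatMap
        (fun item => find_three_deep_sets (path ++ [item]) graph (depth + 1) checked_nodes) := by
  have hb : (depth == 3) = false := by simpa using hd
  have hc' : last ∉ checked_nodes := by simpa using hc
  rw [find_three_deep_sets]
  simp [hb, hl, hc']
  split
  · next heq => rw [hns] at heq; cases heq
  · next ns' heq =>
    rw [hns] at heq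
    injection heq with h
    subst h
    rw [PySem.List.foldl_ite_eq_foldl_filter
      (p := fun x => x ∉ path ∧ x ∉ checked_nodes)
      (f := fun res item => res ++ find_three_deep_sets (path ++ [item]) graph (depth + 1) checked_nodes)]
    rw [PySem.List.foldl_append_eq_flatMap]
    have hfc : ns.filter (fun x => decide (x ∉ path ∧ x ∉ checked_nodes))
        = ns.filter (fun item => !path.contains item && !checked_nodes.contains item) := by
      apply List.filter_congr
      intro x _
      cases hpx : path.contains x <;> cases hcx : checked_nodes.contains x <;>
        simp_all [beq_iff_eq, ← List.elem_eq_contains, List.elem_iff]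
    rw [hfc]
    simp

theorem pvChildPre (graph : List (String × List String)) (checked_nodes : List String)
    (p : List String) (d : Int) (item : String) (ns : List String)
    (hok : Pre_find_three_deep_sets p graph d checked_nodes) (hd : d ≠ 3)
    (hlc : p.getLastD "" ∉ checked_nodes)
    (hns : PySem.Dict.get? (PySem.Dict.mk graph) (p.getLastD "") = some ns)
    (hmem : item ∈ ns) (hnc : item ∉ checked_nodes) :
    Pre_find_three_deep_sets (p ++ [item]) graph (d + 1) checked_nodes := by
  unfold Pre_find_three_deep_sets at hok ⊢
  rcases hok with h3 | ⟨hne, hrest⟩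
  · exact absurd h3 hd
  rcases hrest with hchk | ⟨hkey, hdc⟩
  · exact absurd hchk hlc
  by_cases h2 : d = 2
  · exact Or.inl (by simp [h2])
  have hcl : pvClosed graph checked_nodes := by
    rcases hdc with h | h
    · exact absurd h h2
    · exact h
  refine Or.inr ⟨by simp, Or.inr ⟨?_, Or.inr hcl⟩⟩
  obtain ⟨pr, hpr, rfl⟩ := pvMem_graph_of_get? graph (p.getLastD "") ns hns
  have := hcl pr hpr item hmem
  rcases this with h | h
  · simpa using h
  · exact absurd h hnc

theorem pvFlatMap_congr {α β : Type} (l : List α) (f g : α → List β)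
    (h : ∀ a ∈ l, f a = g a) : l.flatMap f = l.flatMap g := by
  induction l with
  | nil => rfl
  | cons x xs ih =>
    simp only [List.flatMap_cons, h x (List.mem_cons_self),
      ih (fun a ha => h a (List.mem_cons_of_mem _ ha))]

theorem pvLevel_pre (graph : List (String × List String)) (checked_nodes : List String)
    (p q : List String) (d : Int)
    (hpre : Pre_find_three_deep_sets p graph d checked_nodes) (hd : d ≠ 3)
    (hq : q ∈ pvLevel graph checked_nodes p) :
    Pre_find_three_deep_sets q graph (d + 1) checked_nodes := by
  have hne : p ≠ [] := by
    rcases hpre with h3 | ⟨h, _⟩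
    · exact absurd h3 hd
    · exact h
  unfold pvLevel at hq
  rw [pvLast?_eq p hne] at hq
  dsimp only at hq
  by_cases hc : p.getLastD "" ∈ checked_nodes
  · rw [if_pos hc] at hq; simp at hq
  · rw [if_neg hc] at hq
    rcases h2 : graph.find? (fun pr => pr.1 == p.getLastD "") with _ | pr
    · rw [h2] at hq; simp at hq
    · rw [h2] at hq
      obtain ⟨item, hitem, rfl⟩ := List.mem_map.mp hq
      have hmem : item ∈ pr.2 := List.mem_of_mem_filter hitem
      have hpred := List.of_mem_filter hitem
      have hnc : item ∉ checked_nodes := by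
        by_contra hcon
        simp [hcon] at hpred
      have hget : PySem.Dict.get? (PySem.Dict.mk graph) (p.getLastD "") = some pr.2 := by
        rw [← pvFind_eq, h2]; rfl
      exact pvChildPre graph checked_nodes p d item pr.2 hpre hd hc hget hmem hnc

theorem pvStep (graph : List (String × List String)) (checked_nodes : List String)
    (p : List String) (d : Int)
    (hpre : Pre_find_three_deep_sets p graph d checked_nodes) (hd : d ≠ 3) :
    (pvLevel graph checked_nodes p).flatMap
        (fun q => find_three_deep_sets q graph (d + 1) checked_nodes)
      = find_three_deep_sets p graph d checked_nodes := by
  have hne : p ≠ [] := by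
    rcases hpre with h3 | ⟨h, _⟩
    · exact absurd h3 hd
    · exact h
  unfold pvLevel
  rw [pvLast?_eq p hne]
  dsimp only
  by_cases hc : p.getLastD "" ∈ checked_nodes
  · rw [if_pos hc]
    rw [pvA_checked p graph d checked_nodes _ hd (pvGet_last p hne) (by simpa using hc)]
    simp
  · rw [if_neg hc]
    have hkey : p.getLastD "" ∈ pvKeys graph := by
      rcases hpre with h3 | ⟨_, hrest⟩
      · exact absurd h3 hd
      rcases hrest with hchk | ⟨hkey, _⟩
      · exact absurd hchk hc
      · exact hkey
    obtain ⟨ns, hns⟩ := pvGet?_of_mem_keys graph _ hkey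
    rcases h2 : graph.find? (fun pr => pr.1 == p.getLastD "") with _ | pr
    · exfalso
      have := pvFind_eq graph (p.getLastD "")
      rw [h2, hns] at this
      simp at this
    · have hpr2 : pr.2 = ns := by
        have := pvFind_eq graph (p.getLastD "")
        rw [h2, hns] at this
        simpa using this
      rw [h2]
      dsimp only
      rw [pvA_expand p graph d checked_nodes _ ns hd (pvGet_last p hne)
        (by simpa using hc) hns]
      subst hpr2
      rw [List.flatMap_map]
      congr 1
      apply List.filter_congr
      intro x _
      by_cases hpx : x ∈ p <;> by_cases hcx : x ∈ checked_nodes <;> simp [hpx, hcx]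


theorem pvBFS_eq (graph : List (String × List String)) (checked_nodes : List String)
    (depth : Int) (frontier : List (List String))
    (hok : ∀ p ∈ frontier, Pre_find_three_deep_sets p graph depth checked_nodes) :
    pvBFS graph checked_nodes depth frontier
      = frontier.flatMap (fun p => find_three_deep_sets p graph depth checked_nodes) := by
  induction depth, frontier using pvBFS.induct graph checked_nodes with
  | case1 depth frontier hcond =>
    rw [pvBFS, if_pos hcond]
    rcases Bool.or_eq_true_iff.mp hcond with he | h3
    · obtain rfl : frontier = [] := List.isEmpty_iff.mp he
      simp
    · have hd : depth = 3 := by simpa using h3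
      rw [pvFlatMap_congr frontier _ (fun p => [p])
        (fun p _ => pvA_three p graph depth checked_nodes hd)]
      simp
  | case2 depth frontier hcond ih =>
    simp only [List.flatMap_subtype, List.unattach_attach] at ih
    rw [pvBFS, if_neg hcond]
    have hd : depth ≠ 3 := by
      intro h
      exact hcond (by simp [h])
    have hok' : ∀ q ∈ frontier.flatMap (pvLevel graph checked_nodes),
        Pre_find_three_deep_sets q graph (depth + 1) checked_nodes := by
      intro q hq
      obtain ⟨p, hp, hqp⟩ := List.mem_flatMap.mp hq
      exact pvLevel_pre graph checked_nodes p q depth (hok p hp) hd hqp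
    rw [ih hok', List.flatMap_assoc]
    exact pvFlatMap_congr frontier _ _
      (fun p hp => pvStep graph checked_nodes p depth (hok p hp) hd)

-- ===== VERDICT (by name: the statement is the Claim_ definition above) =====
theorem find_three_deep_sets_spec : Claim_equal_find_three_deep_sets := by
  intro path graph depth checked_nodes _ hpre
  unfold Spec_find_three_deep_sets find_three_deep_sets_alt
  rw [pvBFS_eq graph checked_nodes depth [path]
    (by intro p hp; simp at hp; subst hp; exact hpre)]
  simp
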